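-- pv_equiv track=rewrite | github.com/Aimmecat/SM2 | python/Algorithm/Montgomery.py | MontgomeryPreCalculate
-- ===== SOURCE A (Python) =====
-- def RapidMod(a: int, p: int):
--     if a < 0:
--         c, r = RapidMod(-a, p)
--         if r:
--             return -c - 1, p - r
--         else:
--             return -c, 0
--     if a < p:
--         return 0, a
--     a_len = a.bit_length()
--     p_len = p.bit_length()
--     d_len = a_len - p_len
--     if d_len == 0:
--         return 1, a - p
--     c = 0
--     for j in range(d_len, -1, -1):
--         c <<= 1
--         a1 = a >> j
--         if a1 < p:
--             continue
--         c += 1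
--         b1 = a - (a1 << j)
--         a1 = a1 - p
--         a = (a1 << j) + b1
--     return c, a
--
-- def RapidMultiplyMod(a: int, b: int, p: int):
--     _, a = RapidMod(a, p)
--     _, b = RapidMod(b, p)
--     r = 0
--     b_len = b.bit_length()
--     for bit in range(b_len):
--         if b & (1 << bit):
--             _, r = RapidMod(a + r, p)
--         _, a = RapidMod(a << 1, p)
--     return r
--
-- def ExitEuclidean(a: int, p: int):
--     if p == 0:
--         return 0
--     x_last, x_now = 0, 1
--     r_last, r_now = p, a
--     while r_now != 0:
--         # q, c = RapidMod(r_last, r_now)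
--         # r_last, r_now = r_now, c
--         q = r_last // r_now
--         r_last, r_now = r_now, r_last - q * r_now
--         x_last, x_now = x_now, x_last - q * x_now
--     if x_last < 0:
--         x_last += p
--     return x_last
--
-- def MontgomeryPreCalculate(n: int, max_bit=512):
--     lens = n.bit_length()
--     r_len = (lens + 7) // 8 * 8
--     while r_len < max_bit:
--         r_len += 8
--     r = 2 ** r_len
--     _, r1 = RapidMod(r, n)
--     r2 = RapidMultiplyMod(r1, r1, n)
--     x = ExitEuclidean(n, r)
--     _, _n = RapidMod(-x, r)
--     return r, r1, r2, _n
-- ===== SOURCE B (Python) =====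
-- def egcd(a, b):
--     if b == 0:
--         return a, 1, 0
--     g, x1, y1 = egcd(b, a % b)
--     return g, y1, x1 - (a // b) * y1
--
-- def MontgomeryPreCalculate(n, max_bit=512):
--     r_len = max((n.bit_length() + 7) // 8 * 8, (max_bit + 7) // 8 * 8)
--     r = 1 << r_len
--     r1 = r % n
--     r2 = r1 * r1 % n
--     _, x, _ = egcd(n, r)
--     return r, r1, r2, (-x) % r
-- ===== Notes on version B (the rewrite author's own statement) =====
-- stated objective: simpler
-- what changed: Replaces A's hand-rolled binary long-division (RapidMod), bit-by-bit modular multiplication (RapidMultiplyMod), the iterative extended Euclid and the r_len widening loop by direct % / * arithmetic, a closed-form r_len (a max of two rounded values) and a recursive extended-gcd helper.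
-- outside the precondition, e.g. on MontgomeryPreCalculate(0, 8): A returns (256, 256, 65536, 0), B raises ZeroDivisionError; on MontgomeryPreCalculate(-1, 8): A returns (256, 767, 8186801414, 255), B returns (256, 0, 0, 1)
import Mathlib
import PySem

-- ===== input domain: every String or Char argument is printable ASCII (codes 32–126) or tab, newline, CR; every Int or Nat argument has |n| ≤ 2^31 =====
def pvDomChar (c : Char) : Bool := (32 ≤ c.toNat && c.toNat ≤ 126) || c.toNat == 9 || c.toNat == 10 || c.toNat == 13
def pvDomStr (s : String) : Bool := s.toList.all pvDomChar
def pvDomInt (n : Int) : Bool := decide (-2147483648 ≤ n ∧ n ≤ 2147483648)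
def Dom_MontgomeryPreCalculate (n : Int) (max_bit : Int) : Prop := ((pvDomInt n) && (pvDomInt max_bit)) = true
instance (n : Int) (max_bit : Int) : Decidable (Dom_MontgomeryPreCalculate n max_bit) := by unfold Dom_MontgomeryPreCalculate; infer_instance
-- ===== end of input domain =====

-- B replaces A's hand-rolled bit-loop modular arithmetic (RapidMod / RapidMultiplyMod) and the
-- iterative extended Euclid by direct `%` arithmetic, a closed-form r_len and a recursive egcd.

-- termination helper for the Euclidean loops: |a % b| < |b| for b ≠ 0 (Python mod)
theorem pymod_natAbs_lt (a b : Int) (hb : b ≠ 0) :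
    (PySem.Int.mod a b).natAbs < b.natAbs := by
  rcases lt_or_gt_of_ne hb with h | h
  · have := PySem.Int.mod_neg_bounds a h
    omega
  · have h1 := PySem.Int.mod_nonneg a h
    have h2 := PySem.Int.mod_lt a h
    omega

-- ===== PORT A =====
-- `for j in range(d_len, -1, -1)` over the state (c, a) of RapidMod
def rapidModLoop (j c a p : Int) : Int × Int :=
  if h : 0 ≤ j then
    let c := c <<< (1 : Nat)
    let a1 := a >>> j.toNat
    if a1 < p then rapidModLoop (j - 1) c a p
    else
      let c := c + 1
      let b1 := a - (a1 <<< j.toNat)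
      let a1 := a1 - p
      rapidModLoop (j - 1) c ((a1 <<< j.toNat) + b1) p
  else (c, a)
termination_by (j + 1).toNat
decreasing_by all_goals omega

def RapidMod (a p : Int) : Int × Int :=
  if _h : a < 0 then
    let cr := RapidMod (-a) p
    if cr.2 ≠ 0 then (-cr.1 - 1, p - cr.2) else (-cr.1, 0)
  else if a < p then (0, a)
  else
    let a_len : Int := PySem.Int.bitLength a
    let p_len : Int := PySem.Int.bitLength p
    let d_len := a_len - p_len
    if d_len = 0 then (1, a - p)
    else rapidModLoop d_len 0 a p
termination_by (if a < 0 then 1 else 0 : Nat)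
decreasing_by simp_all; omega

def RapidMultiplyMod (a b p : Int) : Int :=
  let a := (RapidMod a p).2
  let b := (RapidMod b p).2
  let b_len : Int := PySem.Int.bitLength b
  let ra := (PySem.List.pyRange 0 b_len).foldl
    (fun (st : Int × Int) bit =>
      let r := if PySem.Int.band b (1 <<< bit.toNat) ≠ 0 then (RapidMod (st.2 + st.1) p).2 else st.1
      (r, (RapidMod (st.2 <<< (1 : Nat)) p).2))
    (0, a)
  ra.1

-- the `while r_now != 0` loop of ExitEuclidean over the state (x_last, x_now, r_last, r_now)
def exitLoop (x_last x_now r_last r_now : Int) : Int :=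
  if h : r_now ≠ 0 then
    let q := PySem.Int.floordiv r_last r_now
    exitLoop x_now (x_last - q * x_now) r_now (r_last - q * r_now)
  else x_last
termination_by r_now.natAbs
decreasing_by
  have := pymod_natAbs_lt r_last r_now h
  have heq : r_last - PySem.Int.floordiv r_last r_now * r_now = PySem.Int.mod r_last r_now := by
    have := PySem.Int.floordiv_mul_add_mod r_last r_now; omega
  omega

def ExitEuclidean (a p : Int) : Int :=
  if p = 0 then 0
  else
    let x_last := exitLoop 0 1 p a
    if x_last < 0 then x_last + p else x_last

-- `while r_len < max_bit: r_len += 8`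
def lenLoop (r_len max_bit : Int) : Int :=
  if h : r_len < max_bit then lenLoop (r_len + 8) max_bit else r_len
termination_by (max_bit - r_len).toNat
decreasing_by omega

def MontgomeryPreCalculate (n : Int) (max_bit : Int) : List Int :=
  let lens : Int := PySem.Int.bitLength n
  let r_len := PySem.Int.floordiv (lens + 7) 8 * 8
  let r_len := lenLoop r_len max_bit
  let r : Int := 2 ^ r_len.toNat
  let r1 := (RapidMod r n).2
  let r2 := RapidMultiplyMod r1 r1 n
  let x := ExitEuclidean n r
  let _n := (RapidMod (-x) r).2
  [r, r1, r2, _n]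

-- ===== PORT B =====
def egcd (a b : Int) : Int × Int × Int :=
  if h : b ≠ 0 then
    let gxy := egcd b (PySem.Int.mod a b)
    (gxy.1, gxy.2.2, gxy.2.1 - PySem.Int.floordiv a b * gxy.2.2)
  else (a, 1, 0)
termination_by b.natAbs
decreasing_by exact pymod_natAbs_lt a b h

def MontgomeryPreCalculate_alt (n : Int) (max_bit : Int) : List Int :=
  let r_len := max (PySem.Int.floordiv ((PySem.Int.bitLength n : Int) + 7) 8 * 8)
                   (PySem.Int.floordiv (max_bit + 7) 8 * 8)
  let r : Int := (1 : Int) <<< r_len.toNat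
  let r1 := PySem.Int.mod r n
  let r2 := PySem.Int.mod (r1 * r1) n
  let x := (egcd n r).2.1
  [r, r1, r2, PySem.Int.mod (-x) r]

-- ===== PRECONDITION & SPEC =====
-- Pre_ restricts to the natural domain of a Montgomery modulus, n ≥ 1: for n ≤ 0 a modular
-- precomputation is meaningless — A's bit loops then return values that are not residues at all
-- (an artefact of RapidMod's bit-length arithmetic), and B's `%` raises at n = 0.
def Pre_MontgomeryPreCalculate (n : Int) (max_bit : Int) : Prop := 0 < n
instance (n : Int) (max_bit : Int) : Decidable (Pre_MontgomeryPreCalculate n max_bit) := by unfold Pre_MontgomeryPreCalculate; infer_instance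
def pvWitness_MontgomeryPreCalculate : Int × Int := (7, 16)

def Spec_MontgomeryPreCalculate (n : Int) (max_bit : Int) (out : List Int) : Prop := out = MontgomeryPreCalculate_alt n max_bit
instance (n : Int) (max_bit : Int) (out : List Int) : Decidable (Spec_MontgomeryPreCalculate n max_bit out) := by unfold Spec_MontgomeryPreCalculate; infer_instance

-- ===== CLAIM (what is proved, stated in full; the proofs are below) =====
def Claim_equal_MontgomeryPreCalculate : Prop := ∀ (n : Int) (max_bit : Int), Dom_MontgomeryPreCalculate n max_bit → Pre_MontgomeryPreCalculate n max_bit → Spec_MontgomeryPreCalculate n max_bit (MontgomeryPreCalculate n max_bit)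

-- ===== LEMMAS AND PROOFS =====

theorem lenLoop_eq (max_bit : Int) (base : Int) (h0 : 0 ≤ base) (h8 : 8 ∣ base) :
    lenLoop base max_bit = max base (PySem.Int.floordiv (max_bit + 7) 8 * 8) := by
  have hq := PySem.Int.floordiv_mul_add_mod (max_bit + 7) 8
  have hm1 := PySem.Int.mod_nonneg (max_bit + 7) (b := 8) (by omega)
  have hm2 := PySem.Int.mod_lt (max_bit + 7) (b := 8) (by omega)
  set q8 := PySem.Int.floordiv (max_bit + 7) 8 * 8 with hq8
  induction base using lenLoop.induct max_bit with
  | case1 base h ih =>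
    rw [lenLoop]; simp only [h, dite_true]
    rw [ih (by omega) (by omega)]
    omega
  | case2 base h =>
    rw [lenLoop]; simp only [h, dite_false]
    omega

theorem exitLoop_eq (x_last x_now r_last r_now : Int) :
    exitLoop x_last x_now r_last r_now =
      x_last * (egcd r_last r_now).2.1 + x_now * (egcd r_last r_now).2.2 := by
  induction x_last, x_now, r_last, r_now using exitLoop.induct with
  | case1 xl xn rl rn h q ih =>
    rw [exitLoop, egcd]
    simp only [dif_pos h]
    have hmod : rl - PySem.Int.floordiv rl rn * rn = PySem.Int.mod rl rn := by
      have := PySem.Int.floordiv_mul_add_mod rl rn; omega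
    rw [hmod] at ih ⊢
    rw [ih]
    ring
  | case2 xl xn rl rn h =>
    rw [exitLoop, egcd]
    simp only [dif_neg h]
    ring

theorem rapidModLoop_eq (p : Int) (hp : 0 < p) (k : Nat) :
    ∀ c a : Int, 0 ≤ a → a / (2 ^ k : Nat) < p →
    rapidModLoop ((k : Int) - 1) c a p = (c * (2 ^ k : Nat) + a / p, a % p) := by
  induction k with
  | zero =>
    intro c a ha hlt
    rw [rapidModLoop]
    simp only [show ¬ (0:Int) ≤ (0:Int) - 1 by omega, dite_false]
    simp at hlt
    rw [Int.ediv_eq_zero_of_lt ha hlt, Int.emod_eq_of_lt ha hlt]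
    simp
  | succ k ih =>
    intro c a ha hlt
    have hcast : ((k + 1 : Nat) : Int) - 1 = (k : Int) := by push_cast; ring
    rw [rapidModLoop]
    rw [hcast]
    simp only [show (0:Int) ≤ (k:Int) from by positivity, dite_true, Int.toNat_natCast]
    have hpow : (0:Int) < (2 ^ k : Nat) := by positivity
    have hsr : a >>> k = a / (2 ^ k : Nat) := Int.shiftRight_eq_div_pow a k
    have hc2 : c <<< (1:Nat) = c * 2 := by rw [Int.shiftLeft_eq]; ring
    have hdd : a / (2 ^ k : Nat) / 2 = a / (2 ^ (k+1) : Nat) := by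
      rw [Int.ediv_ediv_eq_ediv_mul (by positivity)]
      congr 1
    have ha1lt2p : a / (2 ^ k : Nat) < 2 * p := by
      have := (Int.ediv_lt_iff_lt_mul (a := a / (2 ^ k : Nat)) (b := p) (c := 2) (by omega)).mp
        (by rw [hdd]; exact hlt)
      omega
    by_cases hb : a >>> k < p
    · rw [if_pos hb, hc2]
      rw [ih (c * 2) a ha (by rw [← hsr]; exact hb)]
      congr 1
      push_cast
      ring
    · rw [if_neg hb, hc2, hsr]
      rw [hsr] at hb
      have hge : p ≤ a / (2 ^ k : Nat) := by omega
      have hmul : ((2:Int) ^ k : Int) = ((2 ^ k : Nat) : Int) := by push_cast; ring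
      have hple : p * (2 ^ k : Nat) ≤ a :=
        (Int.le_ediv_iff_mul_le hpow).mp hge
      -- the new accumulator value equals a - p * 2^k
      have hsl : ∀ x : Int, x <<< k = x * (2 ^ k : Nat) := by
        intro x; rw [Int.shiftLeft_eq]; push_cast; ring
      have hval : (a / (2 ^ k : Nat) - p) <<< k + (a - (a / (2 ^ k : Nat)) <<< k) = a - p * (2 ^ k : Nat) := by
        rw [hsl, hsl]; ring
      rw [hval]
      set a' := a - p * (2 ^ k : Nat) with ha'
      have ha'0 : 0 ≤ a' := by omega
      have ha'div : a' / (2 ^ k : Nat) = a / (2 ^ k : Nat) - p := by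
        rw [ha', show a - p * ((2 ^ k : Nat) : Int) = a + (-p) * ((2 ^ k : Nat) : Int) by ring,
          Int.add_mul_ediv_right _ _ (by positivity : (0:Int) < ((2 ^ k : Nat) : Int)).ne']
        ring
      have hrec : a' / (2 ^ k : Nat) < p := by omega
      rw [ih (c * 2 + 1) a' ha'0 hrec]
      have hdivp : a' / p = a / p - (2 ^ k : Nat) := by
        rw [ha', show a - p * ((2 ^ k : Nat) : Int) = a + (-((2 ^ k : Nat):Int)) * p by ring,
          Int.add_mul_ediv_right _ _ hp.ne']
        ring
      have hmodp : a' % p = a % p := by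
        rw [ha', show a - p * ((2 ^ k : Nat) : Int) = a + (-((2 ^ k : Nat):Int)) * p by ring,
          Int.add_mul_emod_self_right]
      rw [hdivp, hmodp]
      congr 1
      push_cast
      ring

theorem divmod_unique {a b q r : Int} (hb : 0 < b) (h1 : r + b * q = a) (h2 : 0 ≤ r) (h3 : r < b) :
    a / b = q ∧ a % b = r := (Int.ediv_emod_unique hb).mpr ⟨h1, h2, h3⟩

theorem bitLen_le {a p : Int} (hp : 0 < p) (hap : p ≤ a) :
    PySem.Int.bitLength p ≤ PySem.Int.bitLength a ∧ 1 ≤ PySem.Int.bitLength p := by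
  have h1 := PySem.Int.lt_two_pow_bitLength a
  have h2 := PySem.Int.two_pow_bitLength_le p (by omega)
  have h3 := PySem.Int.lt_two_pow_bitLength p
  constructor
  · by_contra h
    have : (2:Nat) ^ PySem.Int.bitLength a ≤ 2 ^ (PySem.Int.bitLength p - 1) :=
      Nat.pow_le_pow_right (by omega) (by omega)
    omega
  · by_contra h
    have h0 : PySem.Int.bitLength p = 0 := by omega
    rw [h0] at h3
    simp at h3
    omega

theorem rapidMod_nonneg_eq (p : Int) (hp : 0 < p) (a : Int) (ha : 0 ≤ a) :
    RapidMod a p = (a / p, a % p) := by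
  rw [RapidMod]
  rw [dif_neg (by omega)]
  by_cases hlt : a < p
  · rw [if_pos hlt]
    obtain ⟨h1, h2⟩ := divmod_unique hp (q := 0) (r := a) (by ring) ha hlt
    rw [h1, h2]
  · rw [if_neg hlt]
    push_cast
    have hap : p ≤ a := by omega
    obtain ⟨hLL, hL1⟩ := bitLen_le hp hap
    have h1 := PySem.Int.lt_two_pow_bitLength a
    have h2 := PySem.Int.two_pow_bitLength_le p (by omega)
    set aL := PySem.Int.bitLength a
    set pL := PySem.Int.bitLength p
    by_cases hd : (aL : Int) - (pL : Int) = 0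
    · rw [if_pos hd]
      have heq : aL = pL := by omega
      have hlt2p : a < 2 * p := by
        have hpow : (2:Nat) ^ aL = 2 ^ (pL - 1) * 2 := by
          rw [heq, ← pow_succ]
          congr 1
          omega
        omega
      obtain ⟨h1', h2'⟩ := divmod_unique hp (q := 1) (r := a - p) (by ring) (by omega) (by omega)
      rw [h1', h2']
    · rw [if_neg hd]
      have hdl : 1 ≤ aL - pL := by omega
      set dl := aL - pL with hdl'
      have hcast : (aL : Int) - (pL : Int) = ((dl + 1 : Nat) : Int) - 1 := by push_cast; omega
      rw [hcast]
      have hpre : a / ((2 ^ (dl + 1) : Nat) : Int) < p := by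
        rw [Int.ediv_lt_iff_lt_mul (by positivity)]
        have hA : (2:Nat) ^ aL ≤ 2 ^ (pL - 1) * 2 ^ (dl + 1) := by
          rw [← pow_add]
          exact Nat.pow_le_pow_right (by omega) (by omega)
        have hB : (2:Nat) ^ (pL - 1) * 2 ^ (dl + 1) ≤ p.natAbs * 2 ^ (dl + 1) :=
          Nat.mul_le_mul_right _ h2
        have hN : a.natAbs < p.natAbs * 2 ^ (dl + 1) := by omega
        have hc : ((p.natAbs * 2 ^ (dl + 1) : Nat) : Int) = p * ((2 ^ (dl + 1) : Nat) : Int) := by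
          push_cast [Int.natAbs_of_nonneg (by omega : (0:Int) ≤ p)]
          ring
        have hI : ((a.natAbs : Nat) : Int) < ((p.natAbs * 2 ^ (dl + 1) : Nat) : Int) :=
          Int.ofNat_lt.mpr hN
        rw [hc, Int.natAbs_of_nonneg ha] at hI
        exact hI
      rw [rapidModLoop_eq p hp (dl + 1) 0 a ha hpre]
      simp

theorem rapidMod_eq (p : Int) (hp : 0 < p) (a : Int) :
    RapidMod a p = (PySem.Int.floordiv a p, PySem.Int.mod a p) := by
  rw [PySem.Int.floordiv_eq_ediv_of_pos hp, PySem.Int.mod_eq_emod_of_pos hp]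
  by_cases hneg : a < 0
  · rw [RapidMod, dif_pos hneg, rapidMod_nonneg_eq p hp (-a) (by omega)]
    simp only
    have hr1 : 0 ≤ (-a) % p := Int.emod_nonneg _ hp.ne'
    have hr2 : (-a) % p < p := Int.emod_lt_of_pos _ hp
    have hsum : (-a) % p + p * ((-a) / p) = -a := Int.emod_add_ediv _ _
    by_cases hr : (-a) % p ≠ 0
    · rw [if_pos hr]
      obtain ⟨h1, h2⟩ := divmod_unique (a := a) hp (q := -((-a)/p) - 1) (r := p - (-a) % p)
        (by ring_nf; omega) (by omega) (by omega)
      rw [h1, h2]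
    · rw [if_neg hr]
      obtain ⟨h1, h2⟩ := divmod_unique (a := a) hp (q := -((-a)/p)) (r := 0)
        (by ring_nf; omega) (by omega) (by omega)
      rw [h1, h2]
  · exact rapidMod_nonneg_eq p hp a (by omega)

theorem mulLoop_eq (p : Int) (hp : 0 < p) (b0 : Int) (hb0 : 0 ≤ b0) (a0 : Int)
    (ha0 : 0 ≤ a0) (ha0p : a0 < p) (L : Nat) :
    (PySem.List.pyRange 0 (L : Int)).foldl
      (fun (st : Int × Int) bit =>
        let r := if PySem.Int.band b0 (1 <<< bit.toNat) ≠ 0 then (RapidMod (st.2 + st.1) p).2 else st.1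
        (r, (RapidMod (st.2 <<< (1 : Nat)) p).2))
      (0, a0)
    = ((a0 * ((b0.toNat % 2 ^ L : Nat) : Int)) % p, (a0 * ((2 ^ L : Nat) : Int)) % p) := by
  induction L with
  | zero =>
    simp [PySem.List.pyRange_one, Int.emod_eq_of_lt ha0 ha0p]
  | succ L ihL =>
    have hstep : ((L + 1 : Nat) : Int) = (L : Int) + 1 := by push_cast; ring
    rw [hstep, PySem.List.pyRange_one_succ_right (by positivity), List.foldl_append, ihL]
    simp only [List.foldl_cons, List.foldl_nil, Int.toNat_natCast]
    simp only [rapidMod_eq p hp, PySem.Int.mod_eq_emod_of_pos hp]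
    have hand := Nat.and_two_pow b0.toNat L
    have htb : b0.toNat.testBit L = decide (b0.toNat / 2 ^ L % 2 = 1) :=
      Nat.testBit_eq_decide_div_mod_eq
    have hmp : b0.toNat % 2 ^ (L + 1) = b0.toNat % 2 ^ L + 2 ^ L * (b0.toNat / 2 ^ L % 2) :=
      Nat.mod_pow_succ
    have hcond : PySem.Int.band b0 (((1 <<< L : Nat) : Nat) : Int) =
        (((b0.toNat.testBit L).toNat * 2 ^ L : Nat) : Int) := by
      rw [PySem.Int.band_of_nonneg hb0 (by positivity), Int.toNat_natCast, Nat.one_shiftLeft, hand]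
    have hsl2 : ∀ x : Int, x <<< (1:Nat) = x * 2 := by
      intro x; rw [Int.shiftLeft_eq]; ring
    have hsnd : ∀ x : Int, (x % p * 2) % p = (x * 2) % p := by
      intro x
      conv_rhs => rw [Int.mul_emod]
      conv_lhs => rw [Int.mul_emod, Int.emod_emod_of_dvd _ dvd_rfl]
    have hsndgoal : (((a0 * ((2 ^ L : Nat) : Int)) % p) <<< (1:Nat)) % p
        = (a0 * ((2 ^ (L+1) : Nat) : Int)) % p := by
      rw [hsl2, hsnd]
      congr 1
      push_cast
      ring
    by_cases hbit : b0.toNat.testBit L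
    · rw [if_pos (by rw [hcond, hbit]; simp)]
      rw [Prod.mk.injEq]
      refine ⟨?_, hsndgoal⟩
      rw [← Int.add_emod]
      have hm : b0.toNat % 2 ^ (L + 1) = b0.toNat % 2 ^ L + 2 ^ L := by
        rw [htb] at hbit
        simp at hbit
        rw [hbit] at hmp
        omega
      rw [hm]
      push_cast
      ring_nf
    · rw [if_neg (by rw [hcond]; simp [hbit])]
      rw [Prod.mk.injEq]
      refine ⟨?_, hsndgoal⟩
      have hm : b0.toNat % 2 ^ (L + 1) = b0.toNat % 2 ^ L := by
        rw [htb] at hbit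
        simp at hbit
        have h0 : b0.toNat / 2 ^ L % 2 = 0 := by omega
        rw [h0] at hmp
        simp at hmp
        omega
      rw [hm]

theorem rapidMultiplyMod_eq (p : Int) (hp : 0 < p) (a b : Int) :
    RapidMultiplyMod a b p = PySem.Int.mod (a * b) p := by
  have hA : (RapidMod a p).2 = a % p := by
    rw [rapidMod_eq p hp, PySem.Int.mod_eq_emod_of_pos hp]
  have hB : (RapidMod b p).2 = b % p := by
    rw [rapidMod_eq p hp, PySem.Int.mod_eq_emod_of_pos hp]
  have ha0 : 0 ≤ (RapidMod a p).2 := by rw [hA]; exact Int.emod_nonneg _ hp.ne'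
  have ha0p : (RapidMod a p).2 < p := by rw [hA]; exact Int.emod_lt_of_pos _ hp
  have hb0 : 0 ≤ (RapidMod b p).2 := by rw [hB]; exact Int.emod_nonneg _ hp.ne'
  set b0 := (RapidMod b p).2 with hb0def
  set a0 := (RapidMod a p).2 with ha0def
  have hfin : b0.toNat % 2 ^ PySem.Int.bitLength b0 = b0.toNat := by
    apply Nat.mod_eq_of_lt
    have := PySem.Int.lt_two_pow_bitLength b0
    omega
  simp only [RapidMultiplyMod]
  rw [← hb0def, ← ha0def]
  rw [mulLoop_eq p hp b0 hb0 a0 ha0 ha0p (PySem.Int.bitLength b0)]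
  simp only
  rw [hfin, Int.toNat_of_nonneg hb0, hA, hB, PySem.Int.mod_eq_emod_of_pos hp, ← Int.mul_emod]

theorem MontgomeryPreCalculate_spec : Claim_equal_MontgomeryPreCalculate := by
  intro n max_bit _hdom hpre
  unfold Pre_MontgomeryPreCalculate at hpre
  unfold Spec_MontgomeryPreCalculate
  simp only [MontgomeryPreCalculate, MontgomeryPreCalculate_alt]
  have hn : 0 < n := hpre
  -- bit length of n is at least 1
  have hbl := PySem.Int.lt_two_pow_bitLength n
  have hbl2 := PySem.Int.two_pow_bitLength_le n (by omega)
  set lens := PySem.Int.bitLength n with hlens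
  have hlens1 : 1 ≤ lens := by
    by_contra h
    have h0 : lens = 0 := by omega
    rw [h0] at hbl
    simp at hbl
    omega
  -- the r_len while loop is the max with the rounded-up max_bit
  have hq := PySem.Int.floordiv_mul_add_mod ((lens : Int) + 7) 8
  have hm1 := PySem.Int.mod_nonneg ((lens : Int) + 7) (b := 8) (by omega)
  have hm2 := PySem.Int.mod_lt ((lens : Int) + 7) (b := 8) (by omega)
  set base := PySem.Int.floordiv ((lens : Int) + 7) 8 * 8 with hbase
  have hbase0 : 0 ≤ base := by omega
  have hbaselens : (lens : Int) ≤ base := by omega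
  rw [lenLoop_eq max_bit base hbase0 ⟨_, mul_comm _ 8⟩]
  set R := max base (PySem.Int.floordiv (max_bit + 7) 8 * 8) with hR
  have hRbase : base ≤ R := le_max_left _ _
  have hRlens : lens ≤ R.toNat := by omega
  -- the two ports build the same r
  have hshl : (1 : Int) <<< R.toNat = 2 ^ R.toNat := by rw [Int.shiftLeft_eq]; ring
  rw [hshl]
  set r : Int := 2 ^ R.toNat with hr
  have hr0 : (0:Int) < r := by positivity
  have hnr : n < r := by
    have h1 : (2:Nat) ^ lens ≤ 2 ^ R.toNat := Nat.pow_le_pow_right (by omega) hRlens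
    have h2 : ((2:Nat) ^ R.toNat : Int) = r := by rw [hr]; push_cast; ring
    omega
  -- r1 and r2
  rw [rapidMod_eq n hn r]
  simp only
  rw [rapidMultiplyMod_eq n hn]
  -- the extended-Euclid coefficient
  rw [ExitEuclidean, if_neg (by omega : ¬ r = 0)]
  rw [exitLoop_eq]
  simp only [zero_mul, one_mul, zero_add]
  conv_rhs => rw [egcd]
  rw [dif_pos (by omega : r ≠ 0)]
  simp only
  have hmodnr : PySem.Int.mod n r = n := by
    rw [PySem.Int.mod_eq_emod_of_pos hr0]
    exact Int.emod_eq_of_lt (by omega) hnr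
  rw [hmodnr]
  set x := (egcd r n).2.2 with hx
  -- the final reduction ignores the sign fix
  rw [rapidMod_eq r hr0]
  simp only
  by_cases hxneg : x < 0
  · rw [if_pos hxneg]
    have : PySem.Int.mod (-(x + r)) r = PySem.Int.mod (-x) r := by
      rw [PySem.Int.mod_eq_emod_of_pos hr0, PySem.Int.mod_eq_emod_of_pos hr0,
        show -(x + r) = -x - r by ring, Int.sub_emod_right]
    rw [this]
  · rw [if_neg hxneg]
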